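-- pv_equiv track=rewrite | github.com/aerialsurveysnz/Oblique_Aerial_Survey_Planner_MatchedPair | Old_appy_versions/app_matched_pair_before_with_optimizer_saved_scenarios_fix.py | coverage_view_family
-- ===== SOURCE A (Python) =====
-- def coverage_view_family(label):
--     lower = (label or "").strip().lower()
--     if "nadir" in lower:
--         return "Nadir"
--     if "left" in lower:
--         return "Left oblique"
--     if "right" in lower:
--         return "Right oblique"
--     if any(token in lower for token in ["fore", "forward", "front"]):
--         return "Fore oblique"
--     if any(token in lower for token in ["aft", "rear", "back"]):
--         return "Aft oblique"
--     return (label or "Camera").strip() or "Camera"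
-- ===== SOURCE B (Python) =====
-- # One left-to-right scan of the normalized text: at each position, see which
-- # keywords start there and keep the lowest-priority family seen anywhere.
-- _PATTERNS = [("nadir", 0), ("left", 1), ("right", 2),
--              ("fore", 3), ("forward", 3), ("front", 3),
--              ("aft", 4), ("rear", 4), ("back", 4)]
-- _NAMES = ["Nadir", "Left oblique", "Right oblique", "Fore oblique", "Aft oblique"]
--
--
-- def coverage_view_family(label):
--     lower = (label or "").strip().lower()
--     best = len(_NAMES)  # sentinel: no family found yet
--     for i in range(len(lower)):
--         for kw, rank in _PATTERNS:
--             if rank < best and lower.startswith(kw, i):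
--                 best = rank
--     if best < len(_NAMES):
--         return _NAMES[best]
--     return (label or "Camera").strip() or "Camera"
-- ===== Notes on version B (the rewrite author's own statement) =====
-- stated objective: alternative
-- what changed: A searches the text once per keyword with early-return branches; B makes a single left-to-right scan of the normalized text, at each position testing which keywords start there and keeping the minimum-priority family, then maps that rank to the name (proved equal to A's first-matching-branch result).
import Mathlib
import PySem

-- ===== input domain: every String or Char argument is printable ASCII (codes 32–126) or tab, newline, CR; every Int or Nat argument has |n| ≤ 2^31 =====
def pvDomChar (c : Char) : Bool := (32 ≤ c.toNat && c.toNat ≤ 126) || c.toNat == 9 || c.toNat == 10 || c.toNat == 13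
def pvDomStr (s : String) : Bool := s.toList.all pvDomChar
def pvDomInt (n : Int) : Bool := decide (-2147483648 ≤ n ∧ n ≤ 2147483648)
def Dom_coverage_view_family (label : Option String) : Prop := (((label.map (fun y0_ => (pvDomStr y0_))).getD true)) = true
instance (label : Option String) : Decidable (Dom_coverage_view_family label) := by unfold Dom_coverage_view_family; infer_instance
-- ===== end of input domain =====

-- B replaces A's per-keyword substring searches by ONE left-to-right scan of the
-- normalized text that keeps the minimum-priority family starting at any position
-- (objective: alternative algorithm, same behaviour).

-- ===== PORT A =====
def coverage_view_family (label : Option String) : String :=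
  let lower := PySem.Str.lower (PySem.Str.strip (label.getD ""))
  if PySem.Str.isIn "nadir" lower then "Nadir"
  else if PySem.Str.isIn "left" lower then "Left oblique"
  else if PySem.Str.isIn "right" lower then "Right oblique"
  else if PySem.Str.isIn "fore" lower || PySem.Str.isIn "forward" lower || PySem.Str.isIn "front" lower then "Fore oblique"
  else if PySem.Str.isIn "aft" lower || PySem.Str.isIn "rear" lower || PySem.Str.isIn "back" lower then "Aft oblique"
  else
    -- (label or "Camera").strip() or "Camera": falsy = None / empty string
    let base := match label with | none => "Camera" | some s => if s = "" then "Camera" else s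
    let st := PySem.Str.strip base
    if st = "" then "Camera" else st

-- ===== PORT B =====
-- Source B's module constants _PATTERNS / _NAMES
def pvPatterns : List (String × Nat) :=
  [("nadir", 0), ("left", 1), ("right", 2),
   ("fore", 3), ("forward", 3), ("front", 3),
   ("aft", 4), ("rear", 4), ("back", 4)]

def pvNames : List String :=
  ["Nadir", "Left oblique", "Right oblique", "Fore oblique", "Aft oblique"]

-- inner loop body of Source B's scan: try every pattern at position i, keep the best rank
-- (lower.startswith(kw, i) with 0 ≤ i is exactly: kw.toList is a prefix of the suffix at i)
def pvScanStep (cs : List Char) (b : Nat) (i : Nat) : Nat :=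
  pvPatterns.foldl (fun b p => if p.2 < b && p.1.toList.isPrefixOf (cs.drop i) then p.2 else b) b

-- the whole scan: best = len(_NAMES) sentinel, then for i in range(len(lower)) …
def pvBest (cs : List Char) : Nat :=
  (List.range cs.length).foldl (pvScanStep cs) pvNames.length

def coverage_view_family_alt (label : Option String) : String :=
  let lower := (PySem.Str.lower (PySem.Str.strip (label.getD ""))).toList
  let best := pvBest lower
  if best < pvNames.length then pvNames.getD best ""   -- _NAMES[best]; in range by the guard
  else
    -- (label or "Camera").strip() or "Camera"
    let base := match label with | none => "Camera" | some s => if s = "" then "Camera" else s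
    let st := PySem.Str.strip base
    if st = "" then "Camera" else st

-- ===== PRECONDITION & SPEC =====
def Spec_coverage_view_family (label : Option String) (out : String) : Prop := out = coverage_view_family_alt label
instance (label : Option String) (out : String) : Decidable (Spec_coverage_view_family label out) := by unfold Spec_coverage_view_family; infer_instance

-- ===== CLAIM (what is proved, stated in full; the proofs are below) =====
def Claim_equal_coverage_view_family : Prop := ∀ (label : Option String), Dom_coverage_view_family label → Spec_coverage_view_family label (coverage_view_family label)

-- ===== LEMMAS AND PROOFS =====

-- the inner fold never increases the accumulator
lemma pvInner_le (P : List (String × Nat)) (c : String × Nat → Bool) (b : Nat) :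
    P.foldl (fun b p => if p.2 < b && c p then p.2 else b) b ≤ b := by
  induction P generalizing b with
  | nil => simp
  | cons q t ih =>
    simp only [List.foldl_cons]
    by_cases h : (q.2 < b && c q) = true
    · rw [if_pos h]
      exact le_trans (ih q.2) (by simp only [Bool.and_eq_true, decide_eq_true_eq] at h; omega)
    · rw [if_neg h]; exact ih b

-- if some pattern in the list matches, the fold ends ≤ its rank
lemma pvInner_le_mem (P : List (String × Nat)) (c : String × Nat → Bool) (b : Nat)
    (p : String × Nat) (hp : p ∈ P) (hc : c p = true) :
    P.foldl (fun b p => if p.2 < b && c p then p.2 else b) b ≤ p.2 := by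
  obtain ⟨s, t, rfl⟩ := List.append_of_mem hp
  rw [List.foldl_append, List.foldl_cons]
  by_cases h : p.2 < (s.foldl (fun b p => if p.2 < b && c p then p.2 else b) b)
  · rw [if_pos ((Bool.and_eq_true _ _).mpr ⟨decide_eq_true h, hc⟩)]
    exact pvInner_le t c p.2
  · rw [if_neg (ne_true_of_eq_false (by rw [decide_eq_false h, Bool.false_and]))]
    exact le_trans (pvInner_le t c _) (by omega)

-- the fold's result is the start value or the rank of a matching pattern
lemma pvInner_cases (P : List (String × Nat)) (c : String × Nat → Bool) (b : Nat) :
    P.foldl (fun b p => if p.2 < b && c p then p.2 else b) b = b ∨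
      ∃ p ∈ P, c p = true ∧ P.foldl (fun b p => if p.2 < b && c p then p.2 else b) b = p.2 := by
  induction P generalizing b with
  | nil => exact Or.inl rfl
  | cons q t ih =>
    simp only [List.foldl_cons]
    by_cases h : (q.2 < b && c q) = true
    · rw [if_pos h]
      rcases ih q.2 with h1 | ⟨p, hp, hc, he⟩
      · exact Or.inr ⟨q, List.mem_cons_self, ((Bool.and_eq_true ..).mp h).2, h1⟩
      · exact Or.inr ⟨p, List.mem_cons_of_mem _ hp, hc, he⟩
    · rw [if_neg h]
      rcases ih b with h1 | ⟨p, hp, hc, he⟩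
      · exact Or.inl h1
      · exact Or.inr ⟨p, List.mem_cons_of_mem _ hp, hc, he⟩

-- same facts for the outer scan over positions
lemma pvOuter_le (cs : List Char) (l : List Nat) (b : Nat) :
    l.foldl (pvScanStep cs) b ≤ b := by
  induction l generalizing b with
  | nil => simp
  | cons i t ih => exact le_trans (ih _) (pvInner_le _ _ _)

lemma pvOuter_le_mem (cs : List Char) (l : List Nat) (b : Nat) (i : Nat) (hi : i ∈ l)
    (p : String × Nat) (hp : p ∈ pvPatterns) (hc : p.1.toList.isPrefixOf (cs.drop i) = true) :
    l.foldl (pvScanStep cs) b ≤ p.2 := by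
  obtain ⟨s, t, rfl⟩ := List.append_of_mem hi
  rw [List.foldl_append, List.foldl_cons]
  exact le_trans (pvOuter_le cs t _) (pvInner_le_mem _ _ _ p hp hc)

lemma pvOuter_cases (cs : List Char) (l : List Nat) (b : Nat) :
    l.foldl (pvScanStep cs) b = b ∨
      ∃ i ∈ l, ∃ p ∈ pvPatterns, p.1.toList.isPrefixOf (cs.drop i) = true ∧
        l.foldl (pvScanStep cs) b = p.2 := by
  induction l generalizing b with
  | nil => exact Or.inl rfl
  | cons j t ih =>
    simp only [List.foldl_cons]
    rcases ih (pvScanStep cs b j) with h1 | ⟨i, hi, p, hp, hc, he⟩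
    · rcases pvInner_cases pvPatterns (fun p => p.1.toList.isPrefixOf (cs.drop j)) b with h2 | ⟨p, hp, hc, he⟩
      · exact Or.inl (by rw [h1]; exact h2)
      · exact Or.inr ⟨j, List.mem_cons_self, p, hp, hc, by rw [h1]; exact he⟩
    · exact Or.inr ⟨i, List.mem_cons_of_mem _ hi, p, hp, hc, he⟩

-- a substring match gives an in-range position where the (nonempty) keyword is a prefix
lemma pvBest_le (cs : List Char) (p : String × Nat) (hp : p ∈ pvPatterns)
    (h : PySem.Chars.isIn p.1.toList cs = true) : pvBest cs ≤ p.2 := by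
  obtain ⟨j, hj⟩ := (PySem.Chars.exists_prefix_drop_iff_isIn p.1.toList cs).mpr h
  have hne : p.1.toList ≠ [] := by fin_cases hp <;> decide
  have hjlt : j < cs.length := by
    by_contra hge
    rw [List.drop_eq_nil_of_le (by omega)] at hj
    exact hne (List.prefix_nil.mp hj)
  exact pvOuter_le_mem cs _ _ j (List.mem_range.mpr hjlt) p hp (List.isPrefixOf_iff_prefix.mpr hj)

lemma pvBest_cases (cs : List Char) :
    pvBest cs = 5 ∨ ∃ p ∈ pvPatterns, PySem.Chars.isIn p.1.toList cs = true ∧ pvBest cs = p.2 := by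
  rcases pvOuter_cases cs (List.range cs.length) pvNames.length with h | ⟨i, _, p, hp, hc, he⟩
  · exact Or.inl h
  · exact Or.inr ⟨p, hp, (PySem.Chars.exists_prefix_drop_iff_isIn p.1.toList cs).mp
      ⟨i, List.isPrefixOf_iff_prefix.mp hc⟩, he⟩

-- the scan computes exactly the first family (in priority order) with a substring match
lemma pvBest_spec (cs : List Char) :
    pvBest cs =
      if PySem.Chars.isIn "nadir".toList cs then 0
      else if PySem.Chars.isIn "left".toList cs then 1
      else if PySem.Chars.isIn "right".toList cs then 2
      else if PySem.Chars.isIn "fore".toList cs || PySem.Chars.isIn "forward".toList cs || PySem.Chars.isIn "front".toList cs then 3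
      else if PySem.Chars.isIn "aft".toList cs || PySem.Chars.isIn "rear".toList cs || PySem.Chars.isIn "back".toList cs then 4
      else 5 := by
  have hcases := pvBest_cases cs
  split_ifs with h1 h2 h3 h4 h5
  · exact Nat.le_zero.mp (pvBest_le cs ("nadir", 0) (by simp [pvPatterns]) h1)
  · have hub := pvBest_le cs ("left", 1) (by simp [pvPatterns]) h2
    rcases hcases with h | ⟨p, hp, hin, he⟩
    · omega
    · fin_cases hp <;> simp_all
  · have hub := pvBest_le cs ("right", 2) (by simp [pvPatterns]) h3
    rcases hcases with h | ⟨p, hp, hin, he⟩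
    · omega
    · fin_cases hp <;> simp_all
  · have hub : pvBest cs ≤ 3 := by
      rcases (Bool.or_eq_true ..).mp h4 with h | h
      rcases (Bool.or_eq_true ..).mp h with h | h
      · exact pvBest_le cs ("fore", 3) (by simp [pvPatterns]) h
      · exact pvBest_le cs ("forward", 3) (by simp [pvPatterns]) h
      · exact pvBest_le cs ("front", 3) (by simp [pvPatterns]) h
    rcases hcases with h | ⟨p, hp, hin, he⟩
    · omega
    · fin_cases hp <;> simp_all
  · have hub : pvBest cs ≤ 4 := by
      rcases (Bool.or_eq_true ..).mp h5 with h | h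
      rcases (Bool.or_eq_true ..).mp h with h | h
      · exact pvBest_le cs ("aft", 4) (by simp [pvPatterns]) h
      · exact pvBest_le cs ("rear", 4) (by simp [pvPatterns]) h
      · exact pvBest_le cs ("back", 4) (by simp [pvPatterns]) h
    rcases hcases with h | ⟨p, hp, hin, he⟩
    · omega
    · fin_cases hp <;> simp_all
  · rcases hcases with h | ⟨p, hp, hin, he⟩
    · exact h
    · exfalso; fin_cases hp <;> simp_all

-- ===== VERDICT (by name: the statement is the Claim_ definition above) =====
theorem coverage_view_family_spec : Claim_equal_coverage_view_family := by
  intro label _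
  unfold Spec_coverage_view_family coverage_view_family coverage_view_family_alt
  simp only [PySem.Str.isIn_eq, pvBest_spec, pvNames]
  split_ifs <;> simp_all
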